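-- pv_equiv track=rewrite | github.com/ashikshafi08/triage.flow | src/agent_tools/issue_operations.py | _generate_file_recommendations
-- ===== SOURCE A (Python) =====
-- from typing import List, Dict, Any, Optional, Annotated, TYPE_CHECKING
--
-- def _generate_file_recommendations(files: List[Dict[str, Any]], search_terms: Dict[str, List[str]]) -> List[str]:
--     """Generate recommendations for files to examine"""
--     if not files:
--         return ["No relevant files found. Consider expanding search terms."]
--
--     recommendations = []
--
--     # Primary files to examine
--     top_files = files[:3]
--     if top_files:
--         recommendations.append(f"Start by examining these high-relevance files: {', '.join([f['file'] for f in top_files])}")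
--
--     # Test coverage
--     test_files = [f for f in files if 'test' in f['file'].lower()]
--     if test_files:
--         recommendations.append(f"Review existing tests: {', '.join([f['file'] for f in test_files[:2]])}")
--     else:
--         recommendations.append("Consider adding tests for any new functionality")
--
--     # Configuration files
--     config_files = [f for f in files if any(ext in f['file'].lower() for ext in ['.json', '.yaml', '.yml', '.cfg'])]
--     if config_files:
--         recommendations.append(f"Check configuration files: {', '.join([f['file'] for f in config_files[:2]])}")
--
--     # Documentation
--     doc_files = [f for f in files if f['file'].lower().endswith(('.md', '.rst', '.txt'))]
--     if doc_files:
--         recommendations.append(f"Update documentation: {', '.join([f['file'] for f in doc_files[:2]])}")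
--
--     return recommendations
-- ===== SOURCE B (Python) =====
-- from typing import List, Dict, Any
--
-- # Table-driven: each category is a (header, limit, predicate, fallback) rule; for each
-- # rule we collect matching names with EARLY TERMINATION once `limit` names are found,
-- # instead of filtering the whole list and slicing afterwards.
-- def _generate_file_recommendations(files: List[Dict[str, Any]], search_terms: Dict[str, List[str]]) -> List[str]:
--     if not files:
--         return ["No relevant files found. Consider expanding search terms."]
--
--     rules = [
--         ("Review existing tests: ", 2,
--          lambda low: 'test' in low,
--          "Consider adding tests for any new functionality"),
--         ("Check configuration files: ", 2,
--          lambda low: any(ext in low for ext in ('.json', '.yaml', '.yml', '.cfg')),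
--          None),
--         ("Update documentation: ", 2,
--          lambda low: low.endswith(('.md', '.rst', '.txt')),
--          None),
--     ]
--
--     recs = ["Start by examining these high-relevance files: "
--             + ", ".join(f['file'] for f in files[:3])]
--     for header, limit, pred, fallback in rules:
--         matches = []
--         for f in files:
--             if len(matches) == limit:
--                 break
--             name = f['file']
--             if pred(name.lower()):
--                 matches.append(name)
--         if matches:
--             recs.append(header + ", ".join(matches))
--         elif fallback is not None:
--             recs.append(fallback)
--     return recs
-- ===== Notes on version B (the rewrite author's own statement) =====
-- stated objective: alternative
-- what changed: A's three hard-coded whole-list filtering comprehensions each sliced afterwards are replaced by a data-driven loop over a (header, limit, predicate, fallback) rule table whose per-rule collection stops scanning files as soon as `limit` matching names are found.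
import Mathlib
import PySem

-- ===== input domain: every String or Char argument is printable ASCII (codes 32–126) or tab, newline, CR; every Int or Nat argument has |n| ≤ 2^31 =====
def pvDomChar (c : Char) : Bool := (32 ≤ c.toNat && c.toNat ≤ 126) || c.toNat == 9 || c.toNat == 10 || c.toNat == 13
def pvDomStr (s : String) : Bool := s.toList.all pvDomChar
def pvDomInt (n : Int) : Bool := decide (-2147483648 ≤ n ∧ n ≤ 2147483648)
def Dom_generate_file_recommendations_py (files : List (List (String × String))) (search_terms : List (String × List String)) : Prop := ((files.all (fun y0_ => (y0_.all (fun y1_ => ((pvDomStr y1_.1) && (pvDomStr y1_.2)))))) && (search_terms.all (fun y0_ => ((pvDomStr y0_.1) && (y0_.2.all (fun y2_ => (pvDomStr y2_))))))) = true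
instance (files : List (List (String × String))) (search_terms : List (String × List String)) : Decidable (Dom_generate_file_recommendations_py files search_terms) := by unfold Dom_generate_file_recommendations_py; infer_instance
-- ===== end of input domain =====

-- B replaces A's three whole-list filter-then-slice passes by a table of (header, limit,
-- predicate, fallback) rules, each collecting its names with early termination at `limit`;
-- objective: alternative decomposition (same asymptotic cost).

-- shared helper: f['file'] with default "" (Pre_ guarantees the key is present)
def pvFile (f : List (String × String)) : String := (PySem.Dict.mk f).getD "file" ""

-- ===== PORT A =====
def generate_file_recommendations_py (files : List (List (String × String))) (search_terms : List (String × List String)) : List String :=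
  if files = [] then ["No relevant files found. Consider expanding search terms."]
  else
    let recommendations : List String := []
    let top_files := PySem.List.slice files none (some 3)
    let recommendations := if top_files ≠ [] then
        recommendations ++ ["Start by examining these high-relevance files: " ++ PySem.Str.join ", " (top_files.map (fun f => pvFile f))]
      else recommendations
    let test_files := files.filter (fun f => PySem.Str.isIn "test" (PySem.Str.lower (pvFile f)))
    let recommendations := if test_files ≠ [] then
        recommendations ++ ["Review existing tests: " ++ PySem.Str.join ", " ((PySem.List.slice test_files none (some 2)).map (fun f => pvFile f))]
      else recommendations ++ ["Consider adding tests for any new functionality"]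
    let config_files := files.filter (fun f => [".json", ".yaml", ".yml", ".cfg"].any (fun ext => PySem.Str.isIn ext (PySem.Str.lower (pvFile f))))
    let recommendations := if config_files ≠ [] then
        recommendations ++ ["Check configuration files: " ++ PySem.Str.join ", " ((PySem.List.slice config_files none (some 2)).map (fun f => pvFile f))]
      else recommendations
    let doc_files := files.filter (fun f => [".md", ".rst", ".txt"].any (fun suf => PySem.Str.endswith (PySem.Str.lower (pvFile f)) suf))
    let recommendations := if doc_files ≠ [] then
        recommendations ++ ["Update documentation: " ++ PySem.Str.join ", " ((PySem.List.slice doc_files none (some 2)).map (fun f => pvFile f))]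
      else recommendations
    recommendations

-- ===== PORT B =====
-- collect the first `limit` file names whose lowered name satisfies `pred` (early exit)
def pvTakeMatches (pred : String → Bool) : Nat → List (List (String × String)) → List String
  | _, [] => []
  | 0, _ :: _ => []
  | Nat.succ k, f :: fs =>
      let name := pvFile f
      if pred (PySem.Str.lower name) then name :: pvTakeMatches pred k fs
      else pvTakeMatches pred (Nat.succ k) fs

-- the rule table: header, limit, predicate on the lowered name, optional fallback line
def pvRules : List (String × Nat × (String → Bool) × Option String) :=
  [("Review existing tests: ", 2, fun low => PySem.Str.isIn "test" low,
    some "Consider adding tests for any new functionality"),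
   ("Check configuration files: ", 2, fun low => [".json", ".yaml", ".yml", ".cfg"].any (fun ext => PySem.Str.isIn ext low),
    none),
   ("Update documentation: ", 2, fun low => [".md", ".rst", ".txt"].any (fun suf => PySem.Str.endswith low suf),
    none)]

def generate_file_recommendations_py_alt (files : List (List (String × String))) (search_terms : List (String × List String)) : List String :=
  if files = [] then ["No relevant files found. Consider expanding search terms."]
  else
    pvRules.foldl (fun recs r =>
        let ms := pvTakeMatches r.2.2.1 r.2.1 files
        if ms ≠ [] then recs ++ [r.1 ++ PySem.Str.join ", " ms]
        else match r.2.2.2 with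
          | some fb => recs ++ [fb]
          | none => recs)
      ["Start by examining these high-relevance files: " ++ PySem.Str.join ", " ((PySem.List.slice files none (some 3)).map (fun f => pvFile f))]

-- ===== PRECONDITION & SPEC =====
-- Pre_ excludes inputs where some file dict lacks the key 'file': there Python A raises KeyError.
def Pre_generate_file_recommendations_py (files : List (List (String × String))) (search_terms : List (String × List String)) : Prop :=
  ∀ f ∈ files, ((PySem.Dict.mk f).get? "file").isSome = true
instance (files : List (List (String × String))) (search_terms : List (String × List String)) : Decidable (Pre_generate_file_recommendations_py files search_terms) := by unfold Pre_generate_file_recommendations_py; infer_instance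

def pvWitness_generate_file_recommendations_py : (List (List (String × String))) × (List (String × List String)) :=
  ([[("file", "tests/config.json")], [("file", "README.md")]], [("bug", ["crash"])])

def Spec_generate_file_recommendations_py (files : List (List (String × String))) (search_terms : List (String × List String)) (out : List String) : Prop := out = generate_file_recommendations_py_alt files search_terms
instance (files : List (List (String × String))) (search_terms : List (String × List String)) (out : List String) : Decidable (Spec_generate_file_recommendations_py files search_terms out) := by unfold Spec_generate_file_recommendations_py; infer_instance

-- ===== CLAIM (what is proved, stated in full; the proofs are below) =====
def Claim_equal_generate_file_recommendations_py : Prop := ∀ (files : List (List (String × String))) (search_terms : List (String × List String)), Dom_generate_file_recommendations_py files search_terms → Pre_generate_file_recommendations_py files search_terms → Spec_generate_file_recommendations_py files search_terms (generate_file_recommendations_py files search_terms)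

-- ===== LEMMAS AND PROOFS =====

-- early-terminating collection = take `n` of the filtered-and-projected list
theorem pvTakeMatches_eq (pred : String → Bool) (n : Nat) (files : List (List (String × String))) :
    pvTakeMatches pred n files =
      ((files.filter (fun f => pred (PySem.Str.lower (pvFile f)))).map (fun f => pvFile f)).take n := by
  induction files generalizing n with
  | nil => cases n <;> simp [pvTakeMatches]
  | cons f fs ih =>
    cases n with
    | zero =>
      simp only [pvTakeMatches, List.take_zero]
    | succ k =>
      cases h : pred (PySem.Str.lower (pvFile f)) <;>
        simp [pvTakeMatches, h, ih]

set_option maxHeartbeats 2000000 in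
-- ===== VERDICT (by name: the statement is the Claim_ definition above) =====
theorem generate_file_recommendations_py_spec : Claim_equal_generate_file_recommendations_py := by
  intro files search_terms _hdom _hpre
  unfold Spec_generate_file_recommendations_py generate_file_recommendations_py generate_file_recommendations_py_alt
  by_cases hnil : files = []
  · simp [hnil]
  · rw [if_neg hnil, if_neg hnil]
    simp only [pvRules, List.foldl_cons, List.foldl_nil, pvTakeMatches_eq]
    -- A's first recommendation guard `top_files ≠ []` holds since files ≠ []
    have htop : PySem.List.slice files none (some 3) ≠ [] := by
      rw [PySem.List.slice_to files (by norm_num)]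
      cases files with
      | nil => exact absurd rfl hnil
      | cons a l => simp
    rw [if_pos htop]
    -- align A's  map-after-take-2  with B's  take-2-after-map
    have hmap : ∀ (l : List (List (String × String))),
        (PySem.List.slice l none (some 2)).map (fun f => pvFile f) =
          ((l.map (fun f => pvFile f)).take 2) := by
      intro l
      rw [PySem.List.slice_to l (by norm_num), List.map_take]
      rfl
    -- emptiness guards: take 2 of map = [] ↔ filter = []
    have hne : ∀ (l : List (List (String × String))),
        ((l.map (fun f => pvFile f)).take 2 ≠ []) ↔ (l ≠ []) := by
      intro l; cases l <;> simp
    simp only [hmap, ne_eq, hne]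
    simp only [List.nil_append]
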